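-- pv_equiv track=rewrite | github.com/DannyJPark/DannyJPark.github.io | 2023_2nd_DataMining/assignment6.py | make_adjacent_list
-- ===== SOURCE A (Python) =====
-- def make_adjacent_list(datas, sub_graph):
--     adjacent_list= dict()
--     neighbor=dict()
--     temp = list()
--
--     for i in range(0, len(sub_graph)):
--         neighbor[sub_graph[i]]=[]
--     temp= []
--
--     for j in range(0, len(datas)):
--             temp = datas[j]
--             if temp[0] in sub_graph and temp[1] in sub_graph:
--
--                     neighbor[temp[0]].append(temp[1])
--
--                     neighbor[temp[1]].append(temp[0])
--
--     adjacent_list = dict(sorted(neighbor.items(), key = lambda x: (x[0],x[1])))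
--     #print (adjacent_list)
--     return adjacent_list
-- ===== SOURCE B (Python) =====
-- def make_adjacent_list(datas, sub_graph):
--     # node-by-node scan: for each distinct node (ascending), collect its
--     # neighbors by one pass over the edges; dict is built already sorted.
--     sub = set(sub_graph)
--     result = {}
--     for u in sorted(sub):
--         lst = []
--         for e in datas:
--             if e[0] in sub and e[1] in sub:
--                 if e[0] == u:
--                     lst.append(e[1])
--                 if e[1] == u:
--                     lst.append(e[0])
--         result[u] = lst
--     return result
-- ===== Notes on version B (the rewrite author's own statement) =====
-- stated objective: alternative
-- what changed: B iterates node-by-node over the deduplicated sub_graph in ascending order, scanning the edge list once per node, instead of A's single edge pass into a dict that is sorted afterwards; the dict is built already sorted, so no final sort of items is needed.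
import Mathlib
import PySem

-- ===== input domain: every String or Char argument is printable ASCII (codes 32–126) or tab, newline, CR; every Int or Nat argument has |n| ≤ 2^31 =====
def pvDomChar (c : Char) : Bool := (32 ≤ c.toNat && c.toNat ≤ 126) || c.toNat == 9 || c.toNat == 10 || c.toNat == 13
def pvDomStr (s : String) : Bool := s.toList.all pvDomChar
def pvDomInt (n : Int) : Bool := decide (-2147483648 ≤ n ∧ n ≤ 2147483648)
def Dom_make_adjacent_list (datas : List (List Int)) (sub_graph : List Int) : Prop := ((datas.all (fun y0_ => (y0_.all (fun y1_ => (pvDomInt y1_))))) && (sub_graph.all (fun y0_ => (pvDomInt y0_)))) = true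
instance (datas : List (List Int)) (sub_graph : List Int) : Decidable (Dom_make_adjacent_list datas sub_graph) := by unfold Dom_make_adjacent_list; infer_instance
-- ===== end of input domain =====

-- B re-implements the adjacency-list construction node-by-node over the deduplicated sub_graph in
-- ascending order (one edge scan per node, dict built already sorted) instead of A's single edge
-- pass followed by sorting the dict items; equal on all inputs where A returns (Pre_ excludes the
-- rows on which A raises IndexError).


-- ===== PORT A =====
-- neighbor[sub_graph[i]] = []  (first loop; pyGetD is total, Pre_ keeps the index in range trivially)
def a_init (sub_graph : List Int) : PySem.Dict Int (List Int) :=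
  (PySem.List.pyRange 0 (PySem.List.len sub_graph)).foldl
    (fun d i => d.insert (PySem.List.pyGetD sub_graph i 0) []) PySem.Dict.empty

-- body of A's edge loop; temp[0]/temp[1] raise IndexError in Python where pyGetD's default would be
-- used — Pre_ excludes exactly those inputs, and `and` short-circuits as in Python (nested ifs)
def a_step (sub_graph : List Int) (d : PySem.Dict Int (List Int)) (temp : List Int) :
    PySem.Dict Int (List Int) :=
  if sub_graph.contains (PySem.List.pyGetD temp 0 0) then
    if sub_graph.contains (PySem.List.pyGetD temp 1 0) then
      (d.modify (PySem.List.pyGetD temp 0 0) [] (fun l => l ++ [PySem.List.pyGetD temp 1 0])).modify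
        (PySem.List.pyGetD temp 1 0) [] (fun l => l ++ [PySem.List.pyGetD temp 0 0])
    else d
  else d

def make_adjacent_list (datas : List (List Int)) (sub_graph : List Int) : List (Int × List Int) :=
  let neighbor :=
    (PySem.List.pyRange 0 (PySem.List.len datas)).foldl
      (fun d j => a_step sub_graph d (PySem.List.pyGetD datas j [])) (a_init sub_graph)
  PySem.List.sorted2 neighbor.items (fun x => x.1) (fun x => x.2)

-- ===== PORT B =====
-- inner edge scan of B for one node u (same short-circuit shape as Source B)
def b_step (sub : PySem.Set Int) (u : Int) (lst : List Int) (e : List Int) : List Int :=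
  if PySem.Set.contains sub (PySem.List.pyGetD e 0 0) then
    if PySem.Set.contains sub (PySem.List.pyGetD e 1 0) then
      if PySem.List.pyGetD e 1 0 = u then
        (if PySem.List.pyGetD e 0 0 = u then lst ++ [PySem.List.pyGetD e 1 0] else lst) ++
          [PySem.List.pyGetD e 0 0]
      else if PySem.List.pyGetD e 0 0 = u then lst ++ [PySem.List.pyGetD e 1 0] else lst
    else lst
  else lst

def make_adjacent_list_alt (datas : List (List Int)) (sub_graph : List Int) : List (Int × List Int) :=
  let sub := PySem.Set.ofList sub_graph
  ((PySem.List.sorted sub (fun x => x)).foldl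
      (fun d u => d.insert u (datas.foldl (b_step sub u) [])) PySem.Dict.empty).items

-- ===== PRECONDITION & SPEC =====
-- Pre_ excludes exactly the inputs where A raises IndexError: an empty row (temp[0]), or a
-- one-element row whose head is in sub_graph (temp[1]).
def Pre_make_adjacent_list (datas : List (List Int)) (sub_graph : List Int) : Prop :=
  ∀ row ∈ datas, row ≠ [] ∧ (row.headI ∈ sub_graph → 2 ≤ row.length)
instance (datas : List (List Int)) (sub_graph : List Int) : Decidable (Pre_make_adjacent_list datas sub_graph) := by unfold Pre_make_adjacent_list; infer_instance
def pvWitness_make_adjacent_list : List (List Int) × List Int := ([[1, 2], [2, 3]], [1, 2])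

def Spec_make_adjacent_list (datas : List (List Int)) (sub_graph : List Int) (out : List (Int × List Int)) : Prop := out = make_adjacent_list_alt datas sub_graph
instance (datas : List (List Int)) (sub_graph : List Int) (out : List (Int × List Int)) : Decidable (Spec_make_adjacent_list datas sub_graph out) := by unfold Spec_make_adjacent_list; infer_instance

-- ===== CLAIM (what is proved, stated in full; the proofs are below) =====
def Claim_equal_make_adjacent_list : Prop := ∀ (datas : List (List Int)) (sub_graph : List Int), Dom_make_adjacent_list datas sub_graph → Pre_make_adjacent_list datas sub_graph → Spec_make_adjacent_list datas sub_graph (make_adjacent_list datas sub_graph)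

-- ===== LEMMAS AND PROOFS =====

-- membership/contains bridge between B's set and A's list membership test
lemma set_contains_ofList (xs : List Int) (y : Int) :
    PySem.Set.contains (PySem.Set.ofList xs) y = xs.contains y := by
  have h := PySem.Set.mem_ofList xs y
  by_cases hy : y ∈ xs <;>
    simp [PySem.Set.contains, hy, h]

-- A's first loop, with the index loop removed
lemma a_init_eq (sg : List Int) :
    a_init sg = sg.foldl (fun d x => d.insert x []) PySem.Dict.empty := by
  unfold a_init
  rw [PySem.List.foldl_pyRange_pyGetD sg 0 (fun d x => d.insert x []) PySem.Dict.empty le_rfl]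
  simp

lemma keys_a_init (sg : List Int) : (a_init sg).keys = PySem.Set.ofList sg := by
  rw [a_init_eq, PySem.Dict.keys_foldl_insert sg (fun _ _ => []) PySem.Dict.empty]
  simp [PySem.Dict.keys_empty, PySem.Set.update, PySem.Set.ofList]

lemma getD_foldl_insert_nil :
    ∀ (xs : List Int) (d : PySem.Dict Int (List Int)) (u : Int), (∀ v, d.getD v [] = []) →
      (xs.foldl (fun d x => d.insert x []) d).getD u [] = [] := by
  intro xs
  induction xs with
  | nil => intro d u h; exact h u
  | cons x t ih =>
      intro d u h
      simp only [List.foldl_cons]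
      exact ih _ u (fun v => by rw [PySem.Dict.getD_insert]; split <;> simp [h])

lemma getD_a_init (sg : List Int) (u : Int) : (a_init sg).getD u [] = [] := by
  rw [a_init_eq]
  exact getD_foldl_insert_nil sg PySem.Dict.empty u (fun v => PySem.Dict.getD_empty v [])

-- one edge of A's loop changes the stored list at u exactly as one edge of B's inner scan does
lemma a_step_getD (sg : List Int) (d : PySem.Dict Int (List Int)) (e : List Int) (u : Int) :
    (a_step sg d e).getD u [] = b_step (PySem.Set.ofList sg) u (d.getD u []) e := by
  unfold a_step b_step
  simp only [set_contains_ofList]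
  by_cases c0 : PySem.List.pyGetD e 0 0 ∈ sg
  · by_cases c1 : PySem.List.pyGetD e 1 0 ∈ sg
    · simp only [List.contains_iff_mem, c0, c1, if_true,
        PySem.Dict.getD_modify]
      split_ifs <;>
        first
          | omega
          | (subst_vars; rfl)
          | (subst_vars; simp only [show PySem.List.pyGetD e 1 0 = PySem.List.pyGetD e 0 0 by
              omega])
    · simp [c1]
  · simp [c0]

lemma loopA_getD (sg : List Int) :
    ∀ (ds : List (List Int)) (d : PySem.Dict Int (List Int)) (u : Int),
      (ds.foldl (a_step sg) d).getD u [] =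
        ds.foldl (b_step (PySem.Set.ofList sg) u) (d.getD u []) := by
  intro ds
  induction ds with
  | nil => intro d u; rfl
  | cons e t ih => intro d u; simp only [List.foldl_cons]; rw [ih, a_step_getD]

lemma contains_a_step (sg : List Int) (d : PySem.Dict Int (List Int)) (e : List Int) (x : Int) :
    d.contains x = true → (a_step sg d e).contains x = true := by
  intro h
  unfold a_step
  split_ifs <;> simp [PySem.Dict.contains_modify, h]

lemma keys_a_step (sg : List Int) (d : PySem.Dict Int (List Int)) (e : List Int)
    (hk : ∀ x ∈ sg, d.contains x = true) : (a_step sg d e).keys = d.keys := by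
  unfold a_step
  split_ifs with c0 c1
  · have h0 : d.contains (PySem.List.pyGetD e 0 0) = true :=
      hk _ (by simpa [List.contains_iff_mem] using c0)
    have h1 : d.contains (PySem.List.pyGetD e 1 0) = true :=
      hk _ (by simpa [List.contains_iff_mem] using c1)
    rw [PySem.Dict.keys_modify, PySem.Dict.keys_insert_of_contains _ _
      (by simp [PySem.Dict.contains_modify, h1]),
      PySem.Dict.keys_modify, PySem.Dict.keys_insert_of_contains _ _ h0]
  · rfl
  · rfl

lemma loopA_keys (sg : List Int) :
    ∀ (ds : List (List Int)) (d : PySem.Dict Int (List Int)),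
      (∀ x ∈ sg, d.contains x = true) → (ds.foldl (a_step sg) d).keys = d.keys := by
  intro ds
  induction ds with
  | nil => intro d _; rfl
  | cons e t ih =>
      intro d hk
      simp only [List.foldl_cons]
      rw [ih _ (fun x hx => contains_a_step sg d e x (hk x hx)), keys_a_step sg d e hk]

-- A's dict after both loops, as a map over the distinct sub_graph nodes
lemma itemsA (datas : List (List Int)) (sg : List Int) :
    (datas.foldl (a_step sg) (a_init sg)).items =
      (PySem.Set.ofList sg : List Int).map
        (fun k => (k, datas.foldl (b_step (PySem.Set.ofList sg) k) [])) := by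
  have hk : ∀ x ∈ sg, (a_init sg).contains x = true := by
    intro x hx
    rw [PySem.Dict.contains_iff_mem_keys, keys_a_init]
    exact (PySem.Set.mem_ofList sg x).2 hx
  have hkeys : (datas.foldl (a_step sg) (a_init sg)).keys = PySem.Set.ofList sg := by
    rw [loopA_keys sg datas (a_init sg) hk, keys_a_init]
  have hnd : (datas.foldl (a_step sg) (a_init sg)).keys.Nodup := by
    rw [hkeys]; exact PySem.Set.nodup_ofList sg
  rw [PySem.Dict.items_eq_map_keys _ hnd [], hkeys]
  refine List.map_congr_left (fun k _ => ?_)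
  rw [loopA_getD sg datas (a_init sg) k, getD_a_init]

-- B's dict, as a map over the sorted distinct nodes
lemma itemsB (datas : List (List Int)) (sg : List Int) :
    make_adjacent_list_alt datas sg =
      (PySem.List.sorted (PySem.Set.ofList sg : List Int) (fun x => x)).map
        (fun u => (u, datas.foldl (b_step (PySem.Set.ofList sg) u) [])) := by
  unfold make_adjacent_list_alt
  rw [PySem.Dict.items_foldl_insert_fresh _ (fun a => a)
    (fun a => datas.foldl (b_step (PySem.Set.ofList sg) a) []) PySem.Dict.empty
    (fun a _ => PySem.Dict.contains_empty a)
    (by simpa using ((PySem.List.sorted_perm (PySem.Set.ofList sg : List Int)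
      (fun x => x) false).nodup_iff).2 (PySem.Set.nodup_ofList sg))]
  simp [PySem.Dict.empty]

-- sorting with the tuple key (x[0], x[1]) equals sorting by the key x[0] when equal first
-- components force equal elements (dict items have unique keys)
lemma insertBy_congr {α : Type} (p q : α → α → Bool) (x : α) :
    ∀ ys : List α, (∀ y ∈ ys, p x y = q x y) →
      PySem.List.insertBy p x ys = PySem.List.insertBy q x ys := by
  intro ys
  induction ys with
  | nil => intro _; rfl
  | cons y t ih =>
      intro h
      simp only [PySem.List.insertBy]
      rw [h y (List.mem_cons_self)]
      split
      · rfl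
      · rw [ih (fun z hz => h z (List.mem_cons_of_mem y hz))]

lemma foldl_insertBy_congr {α : Type} (p q : α → α → Bool) :
    ∀ (xs acc : List α), (∀ a ∈ xs, ∀ b, (b ∈ acc ∨ b ∈ xs) → p a b = q a b) →
      xs.foldl (fun acc x => PySem.List.insertBy p x acc) acc =
        xs.foldl (fun acc x => PySem.List.insertBy q x acc) acc := by
  intro xs
  induction xs with
  | nil => intro acc _; rfl
  | cons x t ih =>
      intro acc h
      simp only [List.foldl_cons]
      rw [insertBy_congr p q x acc (fun b hb => h x List.mem_cons_self b (Or.inl hb))]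
      refine ih _ (fun a ha b hb => ?_)
      refine h a (List.mem_cons_of_mem x ha) b ?_
      rcases hb with hb | hb
      · rcases (PySem.List.mem_insertBy q x b acc).1 hb with rfl | hb
        · exact Or.inr List.mem_cons_self
        · exact Or.inl hb
      · exact Or.inr (List.mem_cons_of_mem x hb)

lemma sorted2_eq_sorted_fst (M' : List (Int × List Int))
    (hM : ∀ p ∈ M', ∀ q ∈ M', p.1 = q.1 → p = q) :
    PySem.List.sorted2 M' (fun x => x.1) (fun x => x.2) =
      PySem.List.sorted M' (fun x => x.1) := by
  show M'.foldl (fun acc x => PySem.List.insertBy _ x acc) [] =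
    M'.foldl (fun acc x => PySem.List.insertBy _ x acc) []
  refine foldl_insertBy_congr _ _ M' [] (fun a ha b hb => ?_)
  have hb' : b ∈ M' := hb.resolve_left (by simp)
  by_cases h1 : a.1 < b.1
  · simp [h1]
  · by_cases h2 : b.1 < a.1
    · simp [h1, h2]
    · have heq : a.1 = b.1 := le_antisymm (not_lt.1 h2) (not_lt.1 h1)
      have : a = b := hM a ha b hb' heq
      subst this
      simp

lemma sorted_map_fst (sg : List Int) (f : Int → List Int) :
    PySem.List.sorted ((PySem.Set.ofList sg : List Int).map (fun k => (k, f k)))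
        (fun x : Int × List Int => x.1) =
      (PySem.List.sorted (PySem.Set.ofList sg : List Int) (fun x => x)).map
        (fun k => (k, f k)) := by
  apply PySem.List.sorted_eq_of_perm_of_pairwise_lt
  · exact (PySem.List.sorted_perm (PySem.Set.ofList sg : List Int) (fun x => x) false).map _
  · exact (PySem.List.sorted_ofList_pairwise_lt sg).map _ (fun a b h => h)

-- ===== VERDICT (by name: the statement is the Claim_ definition above) =====
theorem make_adjacent_list_spec : Claim_equal_make_adjacent_list := by
  intro datas sg _ _
  unfold Spec_make_adjacent_list make_adjacent_list
  rw [PySem.List.foldl_pyRange_pyGetD datas [] (a_step sg) (a_init sg) le_rfl]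
  simp only [Int.toNat_zero, List.drop_zero]
  rw [itemsA datas sg, itemsB datas sg]
  rw [sorted2_eq_sorted_fst _ (by
    intro p hp q hq hpq
    rcases List.mem_map.1 hp with ⟨k, _, rfl⟩
    rcases List.mem_map.1 hq with ⟨j, _, rfl⟩
    simp only at hpq
    subst hpq
    rfl)]
  exact sorted_map_fst sg _
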